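-- pv_equiv track=rewrite | github.com/ofekavidan/Intro-to-CS-HUJI-Python- | Exercise05/wordsearch.py | return_w_diagonal
-- ===== SOURCE A (Python) =====
-- def return_w_diagonal(matrix):
--     """This function gets a matrix and returns string of its w diagonal"""
--
--     if not len(matrix):
--         return ""
--
--     col = len(matrix[0])
--     row = len(matrix)
--     fdiag = [[] for _ in range(row + col - 1)]
--     bdiag = [[] for _ in range(len(fdiag))]
--     min_bdiag = -row + 1
--
--     fdiag_str = ""
--
--     for x in range(col):
--         for y in range(row):
--             fdiag[x + y].append(matrix[y][x])
--             bdiag[x - y - min_bdiag].append(matrix[y][x])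
--
--     for i in fdiag:
--         for j in i:
--             fdiag_str += str(j)
--         fdiag_str += "\n"
--
--     return (fdiag_str)
-- ===== SOURCE B (Python) =====
-- def return_w_diagonal(matrix):
--     """Build the forward-diagonal string directly, one diagonal at a time."""
--     if not len(matrix):
--         return ""
--     col = len(matrix[0])
--     row = len(matrix)
--     res = ""
--     for d in range(row + col - 1):
--         for x in range(col):
--             y = d - x
--             if 0 <= y < row:
--                 res += str(matrix[y][x])
--         res += "\n"
--     return res
-- ===== Notes on version B (the rewrite author's own statement) =====
-- stated objective: simpler
-- what changed: Drops the scatter-into-bucket-lists pass (and the dead bdiag buckets) and builds the result string directly, looping over diagonal index d and emitting matrix[d-x][x] for each valid x.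
import Mathlib
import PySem

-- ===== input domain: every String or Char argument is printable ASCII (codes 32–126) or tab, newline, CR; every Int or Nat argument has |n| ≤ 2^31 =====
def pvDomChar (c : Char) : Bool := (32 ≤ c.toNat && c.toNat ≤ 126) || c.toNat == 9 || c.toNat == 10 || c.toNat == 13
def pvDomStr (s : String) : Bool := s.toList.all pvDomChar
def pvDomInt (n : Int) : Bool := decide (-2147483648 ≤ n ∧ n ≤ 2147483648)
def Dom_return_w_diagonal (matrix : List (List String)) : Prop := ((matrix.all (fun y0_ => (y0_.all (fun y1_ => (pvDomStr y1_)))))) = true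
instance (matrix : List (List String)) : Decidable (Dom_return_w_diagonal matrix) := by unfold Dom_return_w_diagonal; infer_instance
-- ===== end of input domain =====

-- B drops A's scatter-into-bucket-lists pass (and the dead bdiag buckets) and builds the
-- result string directly, one forward diagonal at a time (objective: simpler).

-- ===== PORT A =====
-- matrix[y][x]: under Pre_ (no row shorter than row 0) every access is in range, so getD is exact.
def pvElem (matrix : List (List String)) (x y : Nat) : String :=
  (matrix.getD y []).getD x ""

def return_w_diagonal (matrix : List (List String)) : String :=
  if matrix.length = 0 then "" else
    let col := (matrix.headD []).length
    let row := matrix.length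
    -- fdiag/bdiag buckets kept as the two components of the fold state (bdiag is dead in A too)
    let st := (List.range col).foldl (fun (st : List (List String) × List (List String)) x =>
        (List.range row).foldl (fun st y =>
          (st.1.set (x + y) (st.1.getD (x + y) [] ++ [pvElem matrix x y]),
           st.2.set (x + row - 1 - y) (st.2.getD (x + row - 1 - y) [] ++ [pvElem matrix x y]))) st)
      (List.replicate (row + col - 1) ([] : List String), List.replicate (row + col - 1) ([] : List String))
    st.1.foldl (fun s i => (i.foldl (fun s j => s ++ j) s) ++ "\n") ""

-- ===== PORT B =====
def return_w_diagonal_alt (matrix : List (List String)) : String :=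
  if matrix.length = 0 then "" else
    let col := (matrix.headD []).length
    let row := matrix.length
    (List.range (row + col - 1)).foldl (fun res d =>
      ((List.range col).foldl (fun res x =>
          if x ≤ d ∧ d - x < row then res ++ pvElem matrix x (d - x) else res) res) ++ "\n") ""

-- ===== PRECONDITION & SPEC =====
-- Pre_ excludes ragged matrices with a row shorter than row 0: there Python A raises IndexError
-- (matrix[y][x] with x < len(matrix[0])), returning nothing.
def Pre_return_w_diagonal (matrix : List (List String)) : Prop :=
  ∀ r ∈ matrix, (matrix.headD []).length ≤ r.length
instance (matrix : List (List String)) : Decidable (Pre_return_w_diagonal matrix) := by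
  unfold Pre_return_w_diagonal; infer_instance

def pvWitness_return_w_diagonal : List (List String) := [["1", "2"], ["3", "4"]]

def Spec_return_w_diagonal (matrix : List (List String)) (out : String) : Prop := out = return_w_diagonal_alt matrix
instance (matrix : List (List String)) (out : String) : Decidable (Spec_return_w_diagonal matrix out) := by unfold Spec_return_w_diagonal; infer_instance

-- ===== CLAIM (what is proved, stated in full; the proofs are below) =====
def Claim_equal_return_w_diagonal : Prop := ∀ (matrix : List (List String)), Dom_return_w_diagonal matrix → Pre_return_w_diagonal matrix → Spec_return_w_diagonal matrix (return_w_diagonal matrix)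

-- ===== LEMMAS AND PROOFS =====

-- a fold whose step is componentwise on a pair projects to a fold on the first component
theorem pv_foldl_pair_fst {α β γ : Type} (f : α → γ → α) (g : α × β → γ → β) :
    ∀ (l : List γ) (p : α × β),
      (l.foldl (fun st c => (f st.1 c, g st c)) p).1 = l.foldl f p.1 := by
  intro l
  induction l with
  | nil => intro p; rfl
  | cons a t ih => intro p; simpa [List.foldl] using ih (f p.1 a, g p a)

theorem pv_foldl_fst_of_comm {α β γ : Type} (h : α × β → γ → α × β) (f : α → γ → α)
    (hh : ∀ p c, (h p c).1 = f p.1 c) :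
    ∀ (l : List γ) (p : α × β), (l.foldl h p).1 = l.foldl f p.1 := by
  intro l
  induction l with
  | nil => intro p; rfl
  | cons a t ih => intro p; rw [List.foldl, List.foldl, ← hh p a]; exact ih (h p a)

-- the first-component inner loop of A, as a plain fold
def pvInner (matrix : List (List String)) (x m : Nat) (fd : List (List String)) : List (List String) :=
  (List.range m).foldl (fun fd y => fd.set (x + y) (fd.getD (x + y) [] ++ [pvElem matrix x y])) fd

theorem pvInner_length (matrix : List (List String)) (x : Nat) :
    ∀ (m : Nat) (fd : List (List String)), (pvInner matrix x m fd).length = fd.length := by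
  intro m
  induction m with
  | zero => intro fd; rfl
  | succ m ih =>
      intro fd
      simp only [pvInner, List.range_succ, List.foldl_append, List.foldl_cons, List.foldl_nil]
      rw [List.length_set]
      exact ih fd

theorem pv_set_getD (l : List (List String)) (i d : Nat) (a : List String) :
    (l.set i a).getD d [] = if i = d ∧ i < l.length then a else l.getD d [] := by
  by_cases hi : i = d
  · subst hi
    by_cases h2 : i < l.length
    · simp [List.getD, h2]
    · rw [if_neg (fun h => h2 h.2)]
      rw [List.getD_eq_default _ _ (Nat.le_of_not_lt h2)]
      simp [List.getD, h2]
  · rw [if_neg (fun h => hi h.1)]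
    simp [List.getD, hi]

theorem pvInner_getD (matrix : List (List String)) (x d : Nat) :
    ∀ (m : Nat) (fd : List (List String)),
      (pvInner matrix x m fd).getD d []
        = if x ≤ d ∧ d - x < m ∧ d < fd.length
          then fd.getD d [] ++ [pvElem matrix x (d - x)] else fd.getD d [] := by
  intro m
  induction m with
  | zero => intro fd; simp [pvInner]
  | succ m ih =>
      intro fd
      have hlen : (pvInner matrix x m fd).length = fd.length := pvInner_length matrix x m fd
      have hstep : pvInner matrix x (m + 1) fd
          = (pvInner matrix x m fd).set (x + m)
              ((pvInner matrix x m fd).getD (x + m) [] ++ [pvElem matrix x m]) := by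
        simp [pvInner, List.range_succ]
      rw [hstep, pv_set_getD, hlen]
      by_cases hd : x + m = d
      · subst hd
        by_cases h2 : x + m < fd.length
        · rw [if_pos ⟨rfl, h2⟩, ih fd]
          have hc1 : ¬ (x ≤ x + m ∧ x + m - x < m ∧ x + m < fd.length) := by omega
          have hc2 : (x ≤ x + m ∧ x + m - x < m + 1 ∧ x + m < fd.length) := by omega
          rw [if_neg hc1, if_pos hc2]
          have hxm : x + m - x = m := by omega
          rw [hxm]
        · rw [if_neg (fun h => h2 h.2), ih fd]
          have hc1 : ¬ (x ≤ x + m ∧ x + m - x < m ∧ x + m < fd.length) := by omega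
          have hc2 : ¬ (x ≤ x + m ∧ x + m - x < m + 1 ∧ x + m < fd.length) := by omega
          rw [if_neg hc1, if_neg hc2]
      · rw [if_neg (fun h => hd h.1), ih fd]
        by_cases hc : x ≤ d ∧ d - x < m ∧ d < fd.length
        · rw [if_pos hc, if_pos (by omega : x ≤ d ∧ d - x < m + 1 ∧ d < fd.length)]
        · rw [if_neg hc, if_neg (by omega : ¬ (x ≤ d ∧ d - x < m + 1 ∧ d < fd.length))]

-- the accumulated bucket of diagonal d after the first k columns
def pvBucket (matrix : List (List String)) (row d k : Nat) : List String :=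
  ((List.range k).filter (fun x => decide (x ≤ d ∧ d - x < row))).map (fun x => pvElem matrix x (d - x))

def pvFd (matrix : List (List String)) (row n k : Nat) : List (List String) :=
  (List.range k).foldl (fun fd x => pvInner matrix x row fd) (List.replicate n [])

theorem pvFd_length (matrix : List (List String)) (row n : Nat) :
    ∀ k, (pvFd matrix row n k).length = n := by
  intro k
  induction k with
  | zero => simp [pvFd]
  | succ k ih =>
      simp only [pvFd, List.range_succ, List.foldl_append, List.foldl_cons, List.foldl_nil]
      rw [pvInner_length]
      exact ih

theorem pvFd_getD (matrix : List (List String)) (row n d : Nat) :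
    ∀ k, (pvFd matrix row n k).getD d [] = if d < n then pvBucket matrix row d k else [] := by
  intro k
  induction k with
  | zero =>
      simp only [pvFd, List.range_zero, List.foldl_nil, pvBucket, List.range_zero,
        List.filter_nil, List.map_nil]
      by_cases h : d < n
      · rw [if_pos h]
        simp [List.getD, h]
      · rw [if_neg h]
        exact List.getD_eq_default _ _ (by simpa [Nat.le_of_not_lt] using Nat.le_of_not_lt (by simpa [List.length_replicate] using h))
  | succ k ih =>
      have hstep : pvFd matrix row n (k + 1) = pvInner matrix k row (pvFd matrix row n k) := by
        simp [pvFd, List.range_succ]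
      rw [hstep, pvInner_getD, pvFd_length]
      have hb : pvBucket matrix row d (k + 1)
          = pvBucket matrix row d k
            ++ (if k ≤ d ∧ d - k < row then [pvElem matrix k (d - k)] else []) := by
        simp only [pvBucket, List.range_succ, List.filter_append, List.map_append]
        by_cases hc : k ≤ d ∧ d - k < row
        · simp [hc]
        · simp [hc]
      by_cases hd : d < n
      · rw [if_pos hd] at ih ⊢
        rw [hb]
        by_cases hc : k ≤ d ∧ d - k < row
        · rw [if_pos ⟨hc.1, hc.2, hd⟩, ih, if_pos hc]
        · have : ¬ (k ≤ d ∧ d - k < row ∧ d < n) := by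
            intro h; exact hc ⟨h.1, h.2.1⟩
          rw [if_neg this, ih, if_neg hc, List.append_nil]
      · rw [if_neg hd] at ih ⊢
        have : ¬ (k ≤ d ∧ d - k < row ∧ d < n) := by intro h; exact hd h.2.2
        rw [if_neg this, ih]

theorem pvFd_eq_map (matrix : List (List String)) (row n k : Nat) :
    pvFd matrix row n k = (List.range n).map (fun d => pvBucket matrix row d k) := by
  apply List.ext_getElem
  · rw [pvFd_length]; simp
  · intro i h1 h2
    have hi : i < n := by simpa [pvFd_length] using h1
    have := pvFd_getD matrix row n i k
    rw [if_pos hi] at this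
    have hg : (pvFd matrix row n k).getD i [] = (pvFd matrix row n k)[i] :=
      List.getD_eq_getElem _ _ h1
    rw [hg] at this
    rw [this]
    simp

-- B's inner string loop builds exactly the concatenation of the bucket
theorem pv_str_foldl_ite (matrix : List (List String)) (row d : Nat) :
    ∀ (l : List Nat) (s : String),
      l.foldl (fun s x => if x ≤ d ∧ d - x < row then s ++ pvElem matrix x (d - x) else s) s
        = ((l.filter (fun x => decide (x ≤ d ∧ d - x < row))).map
            (fun x => pvElem matrix x (d - x))).foldl (fun s j => s ++ j) s := by
  intro l
  induction l with
  | nil => intro s; rfl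
  | cons a t ih =>
      intro s
      rw [List.foldl_cons, List.filter_cons]
      by_cases hc : a ≤ d ∧ d - a < row
      · rw [if_pos hc, if_pos (by simpa using hc), List.map_cons, List.foldl_cons]
        exact ih _
      · rw [if_neg hc, if_neg (by simpa using hc)]
        exact ih _

-- ===== VERDICT (by name: the statement is the Claim_ definition above) =====
theorem return_w_diagonal_spec : Claim_equal_return_w_diagonal := by
  intro matrix _hdom _hpre
  unfold Spec_return_w_diagonal return_w_diagonal return_w_diagonal_alt
  by_cases h0 : matrix.length = 0
  · simp [h0]
  · simp only [h0, if_false]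
    set col := (matrix.headD []).length with hcol
    set row := matrix.length with hrow
    set n := row + col - 1 with hn
    -- A's fold state: project to the first component
    have hfst :
        ((List.range col).foldl (fun (st : List (List String) × List (List String)) x =>
            (List.range row).foldl (fun st y =>
              (st.1.set (x + y) (st.1.getD (x + y) [] ++ [pvElem matrix x y]),
               st.2.set (x + row - 1 - y) (st.2.getD (x + row - 1 - y) [] ++ [pvElem matrix x y]))) st)
          (List.replicate n ([] : List String), List.replicate n ([] : List String))).1
        = pvFd matrix row n col := by
      rw [pvFd]
      apply pv_foldl_fst_of_comm
      intro p x
      exact pv_foldl_pair_fst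
        (fun fd y => fd.set (x + y) (fd.getD (x + y) [] ++ [pvElem matrix x y]))
        (fun st y => st.2.set (x + row - 1 - y) (st.2.getD (x + row - 1 - y) [] ++ [pvElem matrix x y]))
        (List.range row) p
    rw [hfst]
    -- rewrite B's inner loop into bucket form
    have hB : (fun (res : String) (d : Nat) =>
        ((List.range col).foldl (fun res x =>
            if x ≤ d ∧ d - x < row then res ++ pvElem matrix x (d - x) else res) res) ++ "\n")
        = (fun (res : String) (d : Nat) =>
            ((pvBucket matrix row d col).foldl (fun s j => s ++ j) res) ++ "\n") := by
      funext res d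
      rw [pv_str_foldl_ite]
      rfl
    rw [hB]
    -- rewrite A's fdiag into bucket form
    rw [pvFd_eq_map matrix row n col, List.foldl_map]
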